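-- pv_equiv track=rewrite | github.com/trump-fmi/area-preprocessing | BlackboxSimplificationTest.py | recreate
-- ===== SOURCE A (Python) =====
-- def recreate(lines, mapping):
--     geometries = []
--     for entry in mapping:
--         # first = True
--         geometry = []
--         for combination in entry:
--             if len(lines[combination[0]]) == 0:
--                 continue
--             if combination[1] == 1:
--                 if len(geometry) >= 1 and geometry[-1] == lines[combination[0]][-1]:
--                     temp = lines[combination[0]][-2::-1]
--                     for point in temp:
--                         if not geometry[-1] == point:
--                             geometry.append(point)
--                     #geometry.extend(lines[combination[0]][-2::-1])
--                 else:
--                     temp = lines[combination[0]][::-1]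
--                     for point in temp:
--                         if len(geometry) == 0 or not geometry[-1] == point:
--                             geometry.append(point)
--                     #geometry.extend(lines[combination[0]][::-1])
--             elif combination[1] == 0:
--                 if len(geometry) >= 1 and geometry[-1] == lines[combination[0]][0]:
--                     temp = lines[combination[0]][1:]
--                     for point in temp:
--                         if not geometry[-1] == point:
--                             geometry.append(point)
--                     #geometry.extend(lines[combination[0]][1:])
--                 else:
--                     temp = lines[combination[0]]
--                     for point in temp:
--                         if len(geometry) == 0 or not geometry[-1] == point:
--                             geometry.append(point)
--                     #geometry.extend(lines[combination[0]])
--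
--         geometries.append(geometry)
--     return geometries
-- ===== SOURCE B (Python) =====
-- def recreate(lines, mapping):
--     geometries = []
--     for entry in mapping:
--         # stage 1: plain concatenation of the oriented segments, no dedup logic
--         concat = []
--         for combination in entry:
--             segment = lines[combination[0]]
--             if not segment:
--                 continue
--             if combination[1] == 1:
--                 concat += segment[::-1]
--             elif combination[1] == 0:
--                 concat += segment
--         # stage 2: collapse consecutive duplicate points by a pairwise zip scan
--         geometry = concat[:1]
--         for prev, point in zip(concat, concat[1:]):
--             if point != prev:
--                 geometry.append(point)
--         geometries.append(geometry)
--     return geometries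
-- ===== Notes on version B (the rewrite author's own statement) =====
-- stated objective: simpler
-- what changed: Replaces A's single fused loop that dedups while appending (with four branches special-casing when the geometry already ends at the joint point, using three different slices) by two independent staged passes per entry: first a plain concatenation of the oriented segments with no dedup logic, then one pairwise zip scan over the concatenation that drops consecutive duplicate points.
import Mathlib
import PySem

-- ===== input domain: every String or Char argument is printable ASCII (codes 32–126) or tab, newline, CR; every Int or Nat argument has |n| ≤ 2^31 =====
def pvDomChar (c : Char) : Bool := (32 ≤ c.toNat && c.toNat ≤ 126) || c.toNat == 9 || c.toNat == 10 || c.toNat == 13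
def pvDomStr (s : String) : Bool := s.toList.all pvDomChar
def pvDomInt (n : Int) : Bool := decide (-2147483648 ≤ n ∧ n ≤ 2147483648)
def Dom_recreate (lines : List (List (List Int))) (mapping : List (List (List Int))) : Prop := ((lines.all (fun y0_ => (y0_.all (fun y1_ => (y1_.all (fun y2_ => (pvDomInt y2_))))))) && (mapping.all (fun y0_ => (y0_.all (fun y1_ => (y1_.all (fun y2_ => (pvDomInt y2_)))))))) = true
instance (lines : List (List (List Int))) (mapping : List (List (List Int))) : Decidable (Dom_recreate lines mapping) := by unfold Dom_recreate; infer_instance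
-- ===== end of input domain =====

-- B replaces A's single fused dedup-while-appending loop with four joint-point branches by two
-- independent staged passes: plain concatenation of oriented segments, then a pairwise zip scan
-- that drops consecutive duplicates (objective: simpler).

-- ===== PORT A =====
-- A's inner append loop WITHOUT the emptiness check ("if not geometry[-1] == point")
def pyAppendLoopNE (g : List (List Int)) (ps : List (List Int)) : List (List Int) :=
  ps.foldl (fun g p => if ¬ (PySem.List.pyGet? g (-1) = some p) then g ++ [p] else g) g

-- A's inner append loop WITH the emptiness check ("if len(geometry) == 0 or not geometry[-1] == point")
def pyAppendLoopE (g : List (List Int)) (ps : List (List Int)) : List (List Int) :=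
  ps.foldl (fun g p => if g.length = 0 ∨ ¬ (PySem.List.pyGet? g (-1) = some p) then g ++ [p] else g) g

-- the body of A's loop over combinations; the `none` lookup arms are Python IndexErrors, excluded by Pre_
def recreateComb (lines : List (List (List Int))) (g : List (List Int)) (c : List Int) : List (List Int) :=
  match (PySem.List.pyGet? c 0).bind (fun i => PySem.List.pyGet? lines i) with
  | none => g
  | some line =>
    if line.length = 0 then g
    else
      match PySem.List.pyGet? c 1 with
      | none => g
      | some flag =>
        if flag = 1 then
          if 1 ≤ g.length ∧ PySem.List.pyGet? g (-1) = PySem.List.pyGet? line (-1) then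
            pyAppendLoopNE g ((PySem.List.slice? line (some (-2)) none (-1)).getD [])   -- lines[..][-2::-1]
          else
            pyAppendLoopE g ((PySem.List.slice? line none none (-1)).getD [])           -- lines[..][::-1]
        else if flag = 0 then
          if 1 ≤ g.length ∧ PySem.List.pyGet? g (-1) = PySem.List.pyGet? line 0 then
            pyAppendLoopNE g (PySem.List.slice line (some 1) none)                      -- lines[..][1:]
          else
            pyAppendLoopE g line
        else g

def recreate (lines : List (List (List Int))) (mapping : List (List (List Int))) : List (List (List Int)) :=
  mapping.foldl (fun geometries entry => geometries ++ [entry.foldl (recreateComb lines) []]) []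

-- ===== PORT B =====
-- stage 1 step: append the oriented segment (reversed for flag 1) to the plain concatenation
def concatStep (lines : List (List (List Int))) (acc : List (List Int)) (c : List Int) : List (List Int) :=
  match (PySem.List.pyGet? c 0).bind (fun i => PySem.List.pyGet? lines i) with
  | none => acc
  | some segment =>
    if segment = [] then acc
    else
      match PySem.List.pyGet? c 1 with
      | none => acc
      | some flag =>
        if flag = 1 then acc ++ segment.reverse              -- segment[::-1]
        else if flag = 0 then acc ++ segment
        else acc

-- stage 2: geometry = concat[:1]; for prev, point in zip(concat, concat[1:]): append if point != prev
def dedupPass (xs : List (List Int)) : List (List Int) :=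
  (xs.zip (PySem.List.slice xs (some 1) none)).foldl
    (fun g pp => if ¬ (pp.2 = pp.1) then g ++ [pp.2] else g)
    (PySem.List.slice xs none (some 1))

def recreate_alt (lines : List (List (List Int))) (mapping : List (List (List Int))) : List (List (List Int)) :=
  mapping.foldl (fun geometries entry => geometries ++ [dedupPass (entry.foldl (concatStep lines) [])]) []

-- ===== PRECONDITION & SPEC =====
-- Pre_ excludes exactly the inputs on which the Python A raises IndexError: an empty combination,
-- a first entry indexing lines out of Python's range, or a one-element combination whose line is
-- nonempty (A reads the missing flag combination[1] there). B raises at the same inputs.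
def Pre_recreate (lines : List (List (List Int))) (mapping : List (List (List Int))) : Prop :=
  ∀ entry ∈ mapping, ∀ c ∈ entry,
    c ≠ [] ∧ PySem.Raise.InRange lines.length c.headI ∧
      (2 ≤ c.length ∨ PySem.List.pyGet? lines c.headI = some [])
instance (lines : List (List (List Int))) (mapping : List (List (List Int))) : Decidable (Pre_recreate lines mapping) := by unfold Pre_recreate; infer_instance

def pvWitness_recreate : List (List (List Int)) × List (List (List Int)) :=
  ([[[0, 0], [1, 1]]], [[[0, 0], [0, 1]]])

def Spec_recreate (lines : List (List (List Int))) (mapping : List (List (List Int))) (out : List (List (List Int))) : Prop := out = recreate_alt lines mapping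
instance (lines : List (List (List Int))) (mapping : List (List (List Int))) (out : List (List (List Int))) : Decidable (Spec_recreate lines mapping out) := by unfold Spec_recreate; infer_instance

-- ===== CLAIM (what is proved, stated in full; the proofs are below) =====
def Claim_equal_recreate : Prop := ∀ (lines : List (List (List Int))) (mapping : List (List (List Int))), Dom_recreate lines mapping → Pre_recreate lines mapping → Spec_recreate lines mapping (recreate lines mapping)

-- ===== LEMMAS AND PROOFS =====

-- reference consecutive-dedup: keep a point iff it differs from the previously kept point
def ddGo (prev : List Int) : List (List Int) → List (List Int)
  | [] => []
  | x :: t => if x = prev then ddGo prev t else x :: ddGo x t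

def dd : List (List Int) → List (List Int)
  | [] => []
  | a :: t => a :: ddGo a t

-- A-side bridge (proof helper): A's combination step as a dedup-extend of the oriented segment
def dedupExtend (g : List (List Int)) (ps : List (List Int)) : List (List Int) :=
  ps.foldl (fun g p => if g = [] ∨ ¬ (PySem.List.pyGet? g (-1) = some p) then g ++ [p] else g) g

def combDedup (lines : List (List (List Int))) (g : List (List Int)) (c : List Int) : List (List Int) :=
  match (PySem.List.pyGet? c 0).bind (fun i => PySem.List.pyGet? lines i) with
  | none => g
  | some points =>
    match PySem.List.pyGet? c 1 with
    | none => g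
    | some flag =>
      if flag = 1 then dedupExtend g points.reverse
      else if flag = 0 then dedupExtend g points
      else g

-- ---- B's two staged passes compute dd ----

lemma getD_getLast?_of_ne_nil (l : List (List Int)) (h : l ≠ []) (d e : List Int) :
    l.getLast?.getD d = l.getLast?.getD e := by
  cases hl : l.getLast? with
  | none => exact absurd (List.getLast?_eq_none_iff.mp hl) h
  | some z => rfl

lemma zip_filter_eq_ddGo (t : List (List Int)) (a : List Int) :
    (((a :: t).zip t).filter (fun pp => !decide (pp.2 = pp.1))).map (·.2) = ddGo a t := by
  induction t generalizing a with
  | nil => rfl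
  | cons x t ih =>
    by_cases h : x = a <;> simp [ddGo, h, ih]

lemma dedupPass_eq_dd (xs : List (List Int)) : dedupPass xs = dd xs := by
  unfold dedupPass
  rw [PySem.List.slice_from_one,
      PySem.List.foldl_append_ite (p := fun pp : (List Int) × (List Int) => ¬ (pp.2 = pp.1)) (f := fun pp => pp.2)]
  simp only [decide_not]
  cases xs with
  | nil => rfl
  | cons a t =>
    have h1 : PySem.List.slice (a :: t) none (some 1) = [a] := by
      simp [pysem]
    rw [h1, List.tail_cons, zip_filter_eq_ddGo]
    rfl

-- ---- dedupExtend against dd ----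

lemma dedupExtend_ne (g : List (List Int)) (h : g ≠ []) (ps : List (List Int)) :
    dedupExtend g ps = g ++ ddGo (g.getLast h) ps := by
  induction ps generalizing g with
  | nil => simp [dedupExtend, ddGo]
  | cons p ps ih =>
    have hlast : PySem.List.pyGet? g (-1) = some (g.getLast h) := by
      rw [PySem.List.pyGet?_neg_one, List.getLast?_eq_some_getLast h]
    by_cases hp : p = g.getLast h
    · have : ¬ (g = [] ∨ ¬ (PySem.List.pyGet? g (-1) = some p)) := by
        simp [h, hlast, hp]
      simp only [dedupExtend, List.foldl_cons, if_neg this]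
      simpa [ddGo, hp] using ih g h
    · have : (g = [] ∨ ¬ (PySem.List.pyGet? g (-1) = some p)) := by
        right; simp [hlast]; exact fun e => hp e.symm
      simp only [dedupExtend, List.foldl_cons, if_pos this]
      have hg' : g ++ [p] ≠ [] := by simp
      have hl' : (g ++ [p]).getLast hg' = p := by simp
      have := ih (g ++ [p]) hg'
      rw [hl'] at this
      simp only [dedupExtend] at this ⊢
      rw [this, List.append_assoc]
      simp [ddGo, hp]

lemma ddGo_append (t ps : List (List Int)) (prev : List Int) :
    ddGo prev (t ++ ps) = ddGo prev t ++ ddGo (t.getLast?.getD prev) ps := by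
  induction t generalizing prev with
  | nil => simp [ddGo]
  | cons x t ih =>
    have hl : (x :: t).getLast?.getD prev = t.getLast?.getD x := by
      cases t with
      | nil => simp
      | cons y u =>
        rw [List.getLast?_cons_cons]
        exact getD_getLast?_of_ne_nil _ (by simp) _ _
    by_cases h : x = prev
    · subst h
      simp only [List.cons_append, ddGo, hl, ih]
      simp
    · simp only [List.cons_append, ddGo, if_neg h, hl, ih x, List.cons_append]

lemma last_dd (a : List Int) (t : List (List Int)) :
    (a :: ddGo a t).getLast (by simp) = t.getLast?.getD a := by
  induction t generalizing a with
  | nil => simp [ddGo]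
  | cons x t ih =>
    have hl : (x :: t).getLast?.getD a = t.getLast?.getD x := by
      cases t with
      | nil => simp
      | cons y u =>
        rw [List.getLast?_cons_cons]
        exact getD_getLast?_of_ne_nil _ (by simp) _ _
    by_cases h : x = a
    · rw [hl, ← h]; simpa [ddGo, h] using ih a
    · rw [hl]
      have := ih x
      simp only [ddGo, if_neg h]
      rw [List.getLast_cons (by simp)]
      exact this

lemma dedupExtend_dd (acc ps : List (List Int)) :
    dedupExtend (dd acc) ps = dd (acc ++ ps) := by
  cases acc with
  | nil =>
    cases ps with
    | nil => rfl
    | cons p ps =>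
      have h0 : dedupExtend ([] : List (List Int)) (p :: ps) = dedupExtend [p] ps := by
        simp [dedupExtend]
      rw [show dd ([] : List (List Int)) = [] from rfl, h0,
          dedupExtend_ne [p] (by simp) ps]
      simp [dd]
  | cons a t =>
    have hne : dd (a :: t) ≠ [] := by simp [dd]
    rw [dedupExtend_ne _ hne ps]
    show (a :: ddGo a t) ++ ddGo ((a :: ddGo a t).getLast (by simp)) ps = dd ((a :: t) ++ ps)
    rw [last_dd a t]
    simp only [dd, List.cons_append, ddGo_append, List.cons_append]

-- ---- A's combination step equals combDedup (branch analysis) ----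

-- xs indexes itself: filterMap over range(len) of getElem? is the identity
lemma filterMap_getElem_range (ys : List (List Int)) :
    List.filterMap (fun x => ys[x]?) (List.range ys.length) = ys := by
  have h : ∀ x ∈ List.range ys.length, ys[x]? = (some ∘ (fun x => ys.getD x [])) x := by
    intro x hx
    rw [List.mem_range] at hx
    simp [List.getElem?_eq_getElem hx]
  rw [List.filterMap_congr h, List.filterMap_eq_map]
  apply List.ext_getElem (by simp)
  intro i h1 h2
  simp [List.getElem?_eq_getElem h2]

-- lines[..][-2::-1] is the reverse of the line without its last point
lemma slice_neg_two_rev (l : List (List Int)) :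
    PySem.List.slice? l (some (-2)) none (-1) = some l.dropLast.reverse := by
  simp only [PySem.List.slice?, PySem.List.sliceIndices]
  norm_num
  by_cases h : 1 < l.length
  · obtain ⟨m, hm⟩ : ∃ m, l.length = m + 2 := ⟨l.length - 2, by omega⟩
    rw [if_pos h, hm]
    have hmax : max (-2 + ((m + 2 : Nat) : Int)) (-1) = (m : Int) := by push_cast; omega
    rw [hmax]
    have hcnt : ((m : Int) + 1).toNat = m + 1 := by omega
    rw [hcnt]
    have hmem : ∀ x ∈ List.range (m + 1),
        l[((m : Int) + -(x : Int)).toNat]? = l.dropLast.reverse[x]? := by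
      intro x hx
      rw [List.mem_range] at hx
      have h1 : ((m : Int) + -(x : Int)).toNat = m - x := by omega
      rw [h1, List.getElem?_reverse (by simp [hm]; omega), List.getElem?_dropLast]
      simp [hm]
    rw [List.filterMap_congr hmem]
    have hid := filterMap_getElem_range l.dropLast.reverse
    simp only [List.length_reverse, List.length_dropLast, hm] at hid
    simpa using hid
  · rw [if_neg h]
    have hd : l.dropLast = [] := by
      rcases l with _ | ⟨a, _ | ⟨b, t⟩⟩
      · rfl
      · rfl
      · simp at h
    simp [hd]

-- A's no-emptiness-check loop agrees with dedupExtend on a nonempty accumulator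
lemma pyAppendLoopNE_eq (ps : List (List Int)) (g : List (List Int)) (h : g ≠ []) :
    pyAppendLoopNE g ps = dedupExtend g ps := by
  induction ps generalizing g with
  | nil => simp [pyAppendLoopNE, dedupExtend]
  | cons p ps ih =>
    simp only [pyAppendLoopNE, dedupExtend, List.foldl_cons, h]
    by_cases hc : PySem.List.pyGet? g (-1) = some p
    · simpa [hc, h, pyAppendLoopNE, dedupExtend] using ih g h
    · simpa [hc, h, pyAppendLoopNE, dedupExtend] using ih (g ++ [p]) (by simp)

-- A's emptiness-checking loop is dedupExtend
lemma pyAppendLoopE_eq (g : List (List Int)) (ps : List (List Int)) :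
    pyAppendLoopE g ps = dedupExtend g ps := by
  unfold pyAppendLoopE dedupExtend
  congr 1
  funext g p
  simp [List.length_eq_zero_iff]

-- dedupExtend skips a leading point equal to the accumulator's last point
lemma dedupExtend_cons_last (g : List (List Int)) (x : List Int) (ps : List (List Int))
    (h : g ≠ []) (hx : g.getLast? = some x) :
    dedupExtend g (x :: ps) = dedupExtend g ps := by
  simp [dedupExtend, PySem.List.pyGet?_neg_one, h, hx]

lemma comb_eq (lines : List (List (List Int))) (g : List (List Int)) (c : List Int) :
    recreateComb lines g c = combDedup lines g c := by
  unfold recreateComb combDedup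
  cases hl : (PySem.List.pyGet? c 0).bind (fun i => PySem.List.pyGet? lines i) with
  | none => rfl
  | some line =>
    cases hf : PySem.List.pyGet? c 1 with
    | none => cases line <;> simp
    | some flag =>
      dsimp only
      rcases eq_or_ne line [] with hline | hline
      · subst hline; simp [dedupExtend]
      · have hlen : ¬ line.length = 0 := by simpa using hline
        rw [if_neg hlen]
        by_cases h1 : flag = 1
        · subst h1
          rw [if_pos rfl, if_pos rfl, slice_neg_two_rev, PySem.List.slice?_none_none_neg_one]
          simp only [Option.getD_some]
          by_cases hc : 1 ≤ g.length ∧ PySem.List.pyGet? g (-1) = PySem.List.pyGet? line (-1)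
          · obtain ⟨hg1, hg2⟩ := hc
            have hg : g ≠ [] := by cases g <;> simp_all
            have hrev : line.reverse = line.getLast hline :: line.dropLast.reverse := by
              conv_lhs => rw [← List.dropLast_append_getLast hline]
              simp
            have hx : g.getLast? = some (line.getLast hline) := by
              rw [PySem.List.pyGet?_neg_one, PySem.List.pyGet?_neg_one] at hg2
              rw [hg2, List.getLast?_eq_some_getLast hline]
            rw [if_pos ⟨hg1, hg2⟩, hrev, dedupExtend_cons_last g _ _ hg hx,
                pyAppendLoopNE_eq _ _ hg]
          · rw [if_neg hc, pyAppendLoopE_eq]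
        · rw [if_neg h1, if_neg h1]
          by_cases h0 : flag = 0
          · subst h0
            rw [if_pos rfl, if_pos rfl, PySem.List.slice_from_one]
            obtain ⟨x, t, rfl⟩ : ∃ x t, line = x :: t := by
              cases line with | nil => exact absurd rfl hline | cons a b => exact ⟨a, b, rfl⟩
            by_cases hc : 1 ≤ g.length ∧ PySem.List.pyGet? g (-1) = PySem.List.pyGet? (x :: t) 0
            · obtain ⟨hg1, hg2⟩ := hc
              have hg : g ≠ [] := by cases g <;> simp_all
              have hx : g.getLast? = some x := by
                rw [PySem.List.pyGet?_neg_one, PySem.List.pyGet?_zero] at hg2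
                simpa using hg2
              rw [if_pos ⟨hg1, hg2⟩, List.tail_cons, dedupExtend_cons_last g x t hg hx,
                  pyAppendLoopNE_eq _ _ hg]
            · rw [if_neg hc, pyAppendLoopE_eq]
          · rw [if_neg h0, if_neg h0]

-- ---- combDedup on a dd-accumulator is concatStep under dd ----

lemma combDedup_concatStep (lines : List (List (List Int))) (acc : List (List Int)) (c : List Int) :
    combDedup lines (dd acc) c = dd (concatStep lines acc c) := by
  unfold combDedup concatStep
  cases hl : (PySem.List.pyGet? c 0).bind (fun i => PySem.List.pyGet? lines i) with
  | none => rfl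
  | some seg =>
    dsimp only
    rcases eq_or_ne seg [] with hseg | hseg
    · subst hseg
      cases hf : PySem.List.pyGet? c 1 with
      | none => simp
      | some flag => by_cases h1 : flag = 1 <;> by_cases h0 : flag = 0 <;>
          simp [h1, h0, dedupExtend]
    · rw [if_neg hseg]
      cases hf : PySem.List.pyGet? c 1 with
      | none => rfl
      | some flag =>
        dsimp only
        by_cases h1 : flag = 1
        · rw [if_pos h1, if_pos h1, dedupExtend_dd]
        · rw [if_neg h1, if_neg h1]
          by_cases h0 : flag = 0
          · rw [if_pos h0, if_pos h0, dedupExtend_dd]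
          · rw [if_neg h0, if_neg h0]

lemma fold_combDedup (lines : List (List (List Int))) (cs : List (List Int)) (acc : List (List Int)) :
    cs.foldl (combDedup lines) (dd acc) = dd (cs.foldl (concatStep lines) acc) := by
  induction cs generalizing acc with
  | nil => rfl
  | cons c cs ih =>
    simp only [List.foldl_cons, combDedup_concatStep, ih]

lemma entry_eq (lines : List (List (List Int))) (cs : List (List Int)) :
    cs.foldl (recreateComb lines) [] = dedupPass (cs.foldl (concatStep lines) []) := by
  have h : recreateComb lines = combDedup lines := by
    funext g c; exact comb_eq lines g c
  rw [h, dedupPass_eq_dd, ← fold_combDedup lines cs []]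
  rfl

-- ===== VERDICT (by name: the statement is the Claim_ definition above) =====
theorem recreate_spec : Claim_equal_recreate := by
  intro lines mapping _ _
  unfold Spec_recreate recreate recreate_alt
  rw [PySem.List.foldl_append_singleton_eq_map, PySem.List.foldl_append_singleton_eq_map]
  simp only [List.nil_append]
  exact List.map_congr_left (fun entry _ => entry_eq lines entry)
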